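-- pv_equiv track=rewrite | github.com/UlysseCoteAllard/LongTermEMG | LongTermClassificationMain/TrainingsAndEvaluations/self_learning/self_learning_utils.py | segment_dataset_by_gesture_to_remove_transitions
-- ===== SOURCE A (Python) =====
-- def segment_dataset_by_gesture_to_remove_transitions(ground_truths, predictions, model_outputs, examples):
--     ground_truth_segmented_session = []
--     predictions_segmented_session = []
--     model_outputs_segmented_session = []
--     examples_segmented_session = []
--
--     ground_truth_segmented_gesture = []
--     predictions_segmented_gesture = []
--     model_outputs_segmented_gesture = []
--     examples_segmented_gesture = []
--     current_label = ground_truths[0]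
--     for example_index in range(len(ground_truths)):
--         if current_label != ground_truths[example_index]:
--             ground_truth_segmented_session.append(ground_truth_segmented_gesture)
--             predictions_segmented_session.append(predictions_segmented_gesture)
--             model_outputs_segmented_session.append(model_outputs_segmented_gesture)
--             examples_segmented_session.append(examples_segmented_gesture)
--             ground_truth_segmented_gesture = []
--             predictions_segmented_gesture = []
--             model_outputs_segmented_gesture = []
--             examples_segmented_gesture = []
--             current_label = ground_truths[example_index]
--         ground_truth_segmented_gesture.append(ground_truths[example_index])
--         predictions_segmented_gesture.append(predictions[example_index])
--         model_outputs_segmented_gesture.append(model_outputs[example_index])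
--         examples_segmented_gesture.append(examples[example_index])
--     ground_truth_segmented_session.append(ground_truth_segmented_gesture)
--     predictions_segmented_session.append(predictions_segmented_gesture)
--     model_outputs_segmented_session.append(model_outputs_segmented_gesture)
--     examples_segmented_session.append(examples_segmented_gesture)
--     return ground_truth_segmented_session, predictions_segmented_session, model_outputs_segmented_session, \
--            examples_segmented_session
-- ===== SOURCE B (Python) =====
-- def segment_dataset_by_gesture_to_remove_transitions(ground_truths, predictions, model_outputs, examples):
--     # zip the four streams into rows, cut the row list into runs of equal
--     # ground-truth label by scanning ahead, then project each run per field
--     rows = list(zip(ground_truths, predictions, model_outputs, examples))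
--     groups = []
--     while rows:
--         label = rows[0][0]
--         k = 1
--         while k < len(rows) and rows[k][0] == label:
--             k += 1
--         groups.append(rows[:k])
--         rows = rows[k:]
--     return ([[r[0] for r in g] for g in groups],
--             [[r[1] for r in g] for g in groups],
--             [[r[2] for r in g] for g in groups],
--             [[r[3] for r in g] for g in groups])
-- ===== Notes on version B (the rewrite author's own statement) =====
-- stated objective: alternative
-- what changed: Replaces the accumulate-and-flush index loop over four parallel accumulators with: zip the four lists into rows, cut the row list into runs of equal label by scanning ahead at each run start, then project each run back into the four fields.
import Mathlib
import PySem

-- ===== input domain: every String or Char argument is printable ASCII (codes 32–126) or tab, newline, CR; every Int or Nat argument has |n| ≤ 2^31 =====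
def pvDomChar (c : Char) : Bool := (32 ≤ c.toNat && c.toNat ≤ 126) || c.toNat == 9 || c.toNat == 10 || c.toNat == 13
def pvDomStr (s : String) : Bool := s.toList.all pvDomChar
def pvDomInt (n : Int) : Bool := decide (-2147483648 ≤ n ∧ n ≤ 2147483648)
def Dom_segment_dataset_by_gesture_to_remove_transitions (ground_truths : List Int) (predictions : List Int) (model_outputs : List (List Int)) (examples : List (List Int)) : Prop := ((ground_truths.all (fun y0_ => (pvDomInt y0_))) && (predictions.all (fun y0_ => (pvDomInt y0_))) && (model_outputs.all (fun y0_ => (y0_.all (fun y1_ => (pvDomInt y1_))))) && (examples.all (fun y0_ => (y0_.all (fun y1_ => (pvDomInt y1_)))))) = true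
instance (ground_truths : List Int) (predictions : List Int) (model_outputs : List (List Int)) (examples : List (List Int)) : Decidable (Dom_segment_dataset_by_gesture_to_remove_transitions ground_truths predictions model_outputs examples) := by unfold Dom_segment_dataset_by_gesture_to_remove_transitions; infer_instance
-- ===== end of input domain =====

-- B replaces A's accumulate-and-flush loop over four parallel accumulators by zip-into-rows,
-- run-extraction by scanning ahead, and per-field projection (alternative decomposition, same cost).


-- ===== PORT A =====
-- A's loop state: four finished "session" lists, four in-progress "gesture" lists, current label.
structure PvSegState where
  sGt   : List (List Int)
  sPred : List (List Int)
  sMo   : List (List (List Int))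
  sEx   : List (List (List Int))
  gGt   : List Int
  gPred : List Int
  gMo   : List (List Int)
  gEx   : List (List Int)
  cur   : Int
deriving Repr, DecidableEq

-- one iteration of A's for-loop: reads the four lists at index i (in range under Pre_,
-- where pyGetD equals Python's indexing), flushes on label change, appends to the gesture lists
def pvStepA (ground_truths predictions : List Int) (model_outputs examples : List (List Int))
    (s : PvSegState) (i : Int) : PvSegState :=
  let g := PySem.List.pyGetD ground_truths i 0
  let p := PySem.List.pyGetD predictions i 0
  let m := PySem.List.pyGetD model_outputs i []
  let e := PySem.List.pyGetD examples i []
  let s : PvSegState :=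
    if s.cur ≠ g then
      ⟨s.sGt ++ [s.gGt], s.sPred ++ [s.gPred], s.sMo ++ [s.gMo], s.sEx ++ [s.gEx],
       [], [], [], [], g⟩
    else s
  { s with gGt := s.gGt ++ [g], gPred := s.gPred ++ [p], gMo := s.gMo ++ [m], gEx := s.gEx ++ [e] }

def segment_dataset_by_gesture_to_remove_transitions (ground_truths : List Int) (predictions : List Int) (model_outputs : List (List Int)) (examples : List (List Int)) : List (List Int) × List (List Int) × List (List (List Int)) × List (List (List Int)) :=
  -- current_label = ground_truths[0]: in range under Pre_ (ground_truths ≠ [])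
  let init : PvSegState := ⟨[], [], [], [], [], [], [], [], PySem.List.pyGetD ground_truths 0 0⟩
  let s := (PySem.List.pyRange 0 (PySem.List.len ground_truths) 1).foldl
    (pvStepA ground_truths predictions model_outputs examples) init
  (s.sGt ++ [s.gGt], s.sPred ++ [s.gPred], s.sMo ++ [s.gMo], s.sEx ++ [s.gEx])

-- ===== PORT B =====
-- hand port of zip(a, b, c, d): truncates at the shortest list (exact)
def pvZip4 : List Int → List Int → List (List Int) → List (List Int) → List (Int × Int × List Int × List Int)
  | g :: gs, p :: ps, m :: ms, e :: es => (g, p, m, e) :: pvZip4 gs ps ms es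
  | _, _, _, _ => []

-- the inner while loop: how many further rows continue the run with this label
def pvRunLen (label : Int) : List (Int × Int × List Int × List Int) → Nat
  | [] => 0
  | r :: rs => if r.1 = label then pvRunLen label rs + 1 else 0

-- the outer while loop: cut the row list into runs of equal label
def pvGroupRuns : List (Int × Int × List Int × List Int) → List (List (Int × Int × List Int × List Int))
  | [] => []
  | r :: rs =>
      let k := pvRunLen r.1 rs
      (r :: rs.take k) :: pvGroupRuns (rs.drop k)
termination_by rows => rows.length
decreasing_by simp

def segment_dataset_by_gesture_to_remove_transitions_alt (ground_truths : List Int) (predictions : List Int) (model_outputs : List (List Int)) (examples : List (List Int)) : List (List Int) × List (List Int) × List (List (List Int)) × List (List (List Int)) :=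
  let groups := pvGroupRuns (pvZip4 ground_truths predictions model_outputs examples)
  (groups.map (fun g => g.map (fun r => r.1)),
   groups.map (fun g => g.map (fun r => r.2.1)),
   groups.map (fun g => g.map (fun r => r.2.2.1)),
   groups.map (fun g => g.map (fun r => r.2.2.2)))

-- ===== PRECONDITION & SPEC =====
-- Pre_ excludes exactly the inputs on which A raises IndexError: empty ground_truths
-- (ground_truths[0]) or a parallel list shorter than ground_truths (indexed element-wise).
def Pre_segment_dataset_by_gesture_to_remove_transitions (ground_truths : List Int) (predictions : List Int) (model_outputs : List (List Int)) (examples : List (List Int)) : Prop :=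
  ground_truths ≠ [] ∧ ground_truths.length ≤ predictions.length ∧
  ground_truths.length ≤ model_outputs.length ∧ ground_truths.length ≤ examples.length
instance (ground_truths : List Int) (predictions : List Int) (model_outputs : List (List Int)) (examples : List (List Int)) : Decidable (Pre_segment_dataset_by_gesture_to_remove_transitions ground_truths predictions model_outputs examples) := by unfold Pre_segment_dataset_by_gesture_to_remove_transitions; infer_instance

def pvWitness_segment_dataset_by_gesture_to_remove_transitions : List Int × List Int × List (List Int) × List (List Int) :=
  ([1, 1, 2], [5, 6, 7], [[1], [2], [3]], [[4], [5], [6]])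

def Spec_segment_dataset_by_gesture_to_remove_transitions (ground_truths : List Int) (predictions : List Int) (model_outputs : List (List Int)) (examples : List (List Int)) (out : List (List Int) × List (List Int) × List (List (List Int)) × List (List (List Int))) : Prop := out = segment_dataset_by_gesture_to_remove_transitions_alt ground_truths predictions model_outputs examples
instance (ground_truths : List Int) (predictions : List Int) (model_outputs : List (List Int)) (examples : List (List Int)) (out : List (List Int) × List (List Int) × List (List (List Int)) × List (List (List Int))) : Decidable (Spec_segment_dataset_by_gesture_to_remove_transitions ground_truths predictions model_outputs examples out) := by unfold Spec_segment_dataset_by_gesture_to_remove_transitions; infer_instance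

-- ===== CLAIM (what is proved, stated in full; the proofs are below) =====
def Claim_equal_segment_dataset_by_gesture_to_remove_transitions : Prop := ∀ (ground_truths : List Int) (predictions : List Int) (model_outputs : List (List Int)) (examples : List (List Int)), Dom_segment_dataset_by_gesture_to_remove_transitions ground_truths predictions model_outputs examples → Pre_segment_dataset_by_gesture_to_remove_transitions ground_truths predictions model_outputs examples → Spec_segment_dataset_by_gesture_to_remove_transitions ground_truths predictions model_outputs examples (segment_dataset_by_gesture_to_remove_transitions ground_truths predictions model_outputs examples)

-- ===== LEMMAS AND PROOFS =====

def pvStepRow (s : PvSegState) (r : Int × Int × List Int × List Int) : PvSegState :=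
  let s : PvSegState :=
    if s.cur ≠ r.1 then
      ⟨s.sGt ++ [s.gGt], s.sPred ++ [s.gPred], s.sMo ++ [s.gMo], s.sEx ++ [s.gEx],
       [], [], [], [], r.1⟩
    else s
  { s with gGt := s.gGt ++ [r.1], gPred := s.gPred ++ [r.2.1], gMo := s.gMo ++ [r.2.2.1], gEx := s.gEx ++ [r.2.2.2] }

def pvFin (s : PvSegState) :
    List (List Int) × List (List Int) × List (List (List Int)) × List (List (List Int)) :=
  (s.sGt ++ [s.gGt], s.sPred ++ [s.gPred], s.sMo ++ [s.gMo], s.sEx ++ [s.gEx])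

def pvGaux (lab : Int) (cur : List (Int × Int × List Int × List Int)) :
    List (Int × Int × List Int × List Int) → List (List (Int × Int × List Int × List Int))
  | [] => [cur]
  | r :: rs => if r.1 = lab then pvGaux lab (cur ++ [r]) rs else cur :: pvGaux r.1 [r] rs

lemma pvFold_gaux (rows : List (Int × Int × List Int × List Int)) :
    ∀ (lab : Int) (cur : List (Int × Int × List Int × List Int))
      (sa sb : List (List Int)) (sc sd : List (List (List Int))),
    pvFin
      (rows.foldl pvStepRow
        ⟨sa, sb, sc, sd, cur.map (fun r => r.1), cur.map (fun r => r.2.1),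
         cur.map (fun r => r.2.2.1), cur.map (fun r => r.2.2.2), lab⟩)
      = (sa ++ (pvGaux lab cur rows).map (List.map (fun r => r.1)),
         sb ++ (pvGaux lab cur rows).map (List.map (fun r => r.2.1)),
         sc ++ (pvGaux lab cur rows).map (List.map (fun r => r.2.2.1)),
         sd ++ (pvGaux lab cur rows).map (List.map (fun r => r.2.2.2))) := by
  induction rows with
  | nil => intro lab cur sa sb sc sd; simp [pvGaux, pvFin]
  | cons r rs ih =>
    intro lab cur sa sb sc sd
    by_cases h : r.1 = lab
    · have hstep : pvStepRow
          ⟨sa, sb, sc, sd, cur.map (fun r => r.1), cur.map (fun r => r.2.1),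
           cur.map (fun r => r.2.2.1), cur.map (fun r => r.2.2.2), lab⟩ r
        = ⟨sa, sb, sc, sd, (cur ++ [r]).map (fun r => r.1), (cur ++ [r]).map (fun r => r.2.1),
           (cur ++ [r]).map (fun r => r.2.2.1), (cur ++ [r]).map (fun r => r.2.2.2), lab⟩ := by
        simp [pvStepRow, h]
      simp only [List.foldl_cons, hstep, pvGaux, h]
      exact ih lab (cur ++ [r]) sa sb sc sd
    · have hstep : pvStepRow
          ⟨sa, sb, sc, sd, cur.map (fun r => r.1), cur.map (fun r => r.2.1),
           cur.map (fun r => r.2.2.1), cur.map (fun r => r.2.2.2), lab⟩ r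
        = ⟨sa ++ [cur.map (fun r => r.1)], sb ++ [cur.map (fun r => r.2.1)],
           sc ++ [cur.map (fun r => r.2.2.1)], sd ++ [cur.map (fun r => r.2.2.2)],
           ([r]).map (fun r => r.1), ([r]).map (fun r => r.2.1),
           ([r]).map (fun r => r.2.2.1), ([r]).map (fun r => r.2.2.2), r.1⟩ := by
        have h' : ¬ (lab = r.1) := fun he => h he.symm; simp [pvStepRow, h']
      simp only [List.foldl_cons, hstep, pvGaux, if_neg h]
      rw [ih r.1 [r] (sa ++ [cur.map (fun r => r.1)]) (sb ++ [cur.map (fun r => r.2.1)])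
            (sc ++ [cur.map (fun r => r.2.2.1)]) (sd ++ [cur.map (fun r => r.2.2.2)])]
      simp

lemma pvGaux_eq (rs : List (Int × Int × List Int × List Int)) :
    ∀ (lab : Int) (cur : List (Int × Int × List Int × List Int)),
    pvGaux lab cur rs
      = (cur ++ rs.take (pvRunLen lab rs)) :: pvGroupRuns (rs.drop (pvRunLen lab rs)) := by
  induction rs with
  | nil => intro lab cur; simp [pvGaux, pvRunLen, pvGroupRuns]
  | cons r rs ih =>
    intro lab cur
    by_cases h : r.1 = lab
    · simp only [pvGaux, if_pos h, pvRunLen, List.take_succ_cons, List.drop_succ_cons]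
      rw [ih lab (cur ++ [r])]
      simp
    · simp only [pvGaux, if_neg h, pvRunLen]
      rw [ih r.1 [r]]
      simp [pvGroupRuns]

lemma pvZip4_length (gt pred : List Int) (mo ex : List (List Int))
    (h1 : gt.length ≤ pred.length) (h2 : gt.length ≤ mo.length) (h3 : gt.length ≤ ex.length) :
    (pvZip4 gt pred mo ex).length = gt.length := by
  induction gt generalizing pred mo ex with
  | nil => cases pred <;> cases mo <;> cases ex <;> simp [pvZip4]
  | cons g gs ih =>
    cases pred with
    | nil => simp at h1
    | cons p ps =>
      cases mo with
      | nil => simp at h2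
      | cons m ms =>
        cases ex with
        | nil => simp at h3
        | cons e es =>
          simp only [pvZip4, List.length_cons]
          rw [ih ps ms es (by simpa using h1) (by simpa using h2) (by simpa using h3)]

lemma pvZip4_getElem (gt pred : List Int) (mo ex : List (List Int)) (k : Nat)
    (hk : k < (pvZip4 gt pred mo ex).length) :
    (pvZip4 gt pred mo ex)[k] = (gt[k]!, pred[k]!, mo[k]!, ex[k]!) := by
  induction gt generalizing pred mo ex k with
  | nil => cases pred <;> cases mo <;> cases ex <;> simp [pvZip4] at hk
  | cons g gs ih =>
    cases pred with
    | nil => simp [pvZip4] at hk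
    | cons p ps =>
      cases mo with
      | nil => simp [pvZip4] at hk
      | cons m ms =>
        cases ex with
        | nil => simp [pvZip4] at hk
        | cons e es =>
          cases k with
          | zero => simp [pvZip4]
          | succ k =>
            simp only [pvZip4, List.getElem_cons_succ, List.getElem!_cons_succ]
            exact ih ps ms es k (by simpa [pvZip4] using hk)

lemma pvFold_bridge (gt pred : List Int) (mo ex : List (List Int)) (s : PvSegState)
    (h1 : gt.length ≤ pred.length) (h2 : gt.length ≤ mo.length) (h3 : gt.length ≤ ex.length) :
    (PySem.List.pyRange 0 (PySem.List.len gt) 1).foldl (pvStepA gt pred mo ex) s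
      = (pvZip4 gt pred mo ex).foldl pvStepRow s := by
  have hz := pvZip4_length gt pred mo ex h1 h2 h3
  have hlen : PySem.List.len gt = ((pvZip4 gt pred mo ex).length : Int) := by
    simp [PySem.List.len, hz]
  rw [hlen]
  rw [← PySem.List.foldl_pyRange_zero_pyGetD' (pvZip4 gt pred mo ex) (0, 0, [], []) pvStepRow s]
  apply PySem.List.foldl_congr_mem
  intro acc i hi
  rw [PySem.List.mem_pyRange_one] at hi
  have h0 : 0 ≤ i := hi.1
  have hub : i < ((pvZip4 gt pred mo ex).length : Int) := hi.2
  have hk : i.toNat < (pvZip4 gt pred mo ex).length := by omega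
  rw [PySem.List.pyGetD_eq_getElem _ _ h0 hub, pvZip4_getElem _ _ _ _ _ hk]
  have hkg : i.toNat < gt.length := by omega
  have hkp : i.toNat < pred.length := by omega
  have hkm : i.toNat < mo.length := by omega
  have hke : i.toNat < ex.length := by omega
  have hig : i < (gt.length : Int) := by omega
  have hip : i < (pred.length : Int) := by omega
  have him : i < (mo.length : Int) := by omega
  have hie : i < (ex.length : Int) := by omega
  simp only [pvStepA, pvStepRow,
    PySem.List.pyGetD_eq_getElem gt (0:Int) h0 hig,
    PySem.List.pyGetD_eq_getElem pred (0:Int) h0 hip,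
    PySem.List.pyGetD_eq_getElem mo [] h0 him,
    PySem.List.pyGetD_eq_getElem ex [] h0 hie,
    List.getElem!_eq_getElem?_getD]
  simp [hkg, hkp, hkm, hke]

-- ===== VERDICT (by name: the statement is the Claim_ definition above) =====
theorem segment_dataset_by_gesture_to_remove_transitions_spec : Claim_equal_segment_dataset_by_gesture_to_remove_transitions := by
  intro gt pred mo ex _dom hpre
  obtain ⟨hne, h1, h2, h3⟩ := hpre
  unfold Spec_segment_dataset_by_gesture_to_remove_transitions
  cases gt with
  | nil => exact absurd rfl hne
  | cons g0 gt' =>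
    cases pred with
    | nil => simp at h1
    | cons p0 ps =>
      cases mo with
      | nil => simp at h2
      | cons m0 ms =>
        cases ex with
        | nil => simp at h3
        | cons e0 es =>
          simp only [segment_dataset_by_gesture_to_remove_transitions,
            segment_dataset_by_gesture_to_remove_transitions_alt]
          rw [pvFold_bridge _ _ _ _ _ h1 h2 h3]
          have hget0 : PySem.List.pyGetD (g0 :: gt') (0 : Int) 0 = g0 := by
            simp [PySem.List.pyGetD]
          rw [hget0]
          have H := pvFold_gaux (pvZip4 (g0 :: gt') (p0 :: ps) (m0 :: ms) (e0 :: es)) g0 [] [] [] [] []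
          simp only [List.map_nil, pvFin, List.nil_append] at H
          rw [show pvZip4 (g0 :: gt') (p0 :: ps) (m0 :: ms) (e0 :: es)
              = (g0, p0, m0, e0) :: pvZip4 gt' ps ms es from rfl] at H ⊢
          rw [H]
          simp only [pvGaux, List.nil_append, pvGaux_eq, pvGroupRuns]
          simp
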